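-- pv_equiv track=rewrite | github.com/moyac1012/levenshtein_distance_and_steps_app | app.py | levenshtein_distance_and_steps
-- ===== SOURCE A (Python) =====
-- def levenshtein_distance_and_steps(S, T):
--     m, n = len(S), len(T)
--     dp = [[0] * (n + 1) for _ in range(m + 1)]
--
--     for i in range(m + 1):
--         dp[i][0] = i
--     for j in range(n + 1):
--         dp[0][j] = j
--
--     for i in range(1, m + 1):
--         for j in range(1, n + 1):
--             cost = 0 if S[i - 1] == T[j - 1] else 1
--             dp[i][j] = min(dp[i - 1][j] + 1, dp[i][j - 1] + 1, dp[i - 1][j - 1] + cost)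
--
--     i, j = m, n
--     steps = []
--     simulation = [S]  # 変化の過程を保存するリスト
--
--     while i > 0 or j > 0:
--         if i > 0 and dp[i][j] == dp[i - 1][j] + 1:
--             steps.append(f"削除: {S[i - 1]} (位置 {i - 1})")
--             S = S[:i - 1] + S[i:]  # 文字列から削除
--             simulation.append(S)
--             i -= 1
--         elif j > 0 and dp[i][j] == dp[i][j - 1] + 1:
--             steps.append(f"追加: {T[j - 1]} (位置 {j - 1})")
--             S = S[:i] + T[j - 1] + S[i:]  # 文字列に追加
--             simulation.append(S)
--             j -= 1
--         else:
--             if S[i - 1] != T[j - 1]: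
--                 steps.append(f"置換: {S[i - 1]} → {T[j - 1]} (位置 {i - 1})")
--                 S = S[:i - 1] + T[j - 1] + S[i:]  # 文字列を置換
--                 simulation.append(S)
--             i -= 1
--             j -= 1
--
--     steps.reverse()
--     simulation.reverse()
--
--     return dp[m][n], steps, simulation
-- ===== SOURCE B (Python) =====
-- def levenshtein_distance_and_steps(S, T):
--     m, n = len(S), len(T)
--     DEL, INS, DIAG = 0, 1, 2
--     prev = list(range(n + 1))
--     dirs = [[INS] * (n + 1)]  # row 0: along the top edge every move is an insert
--     for i in range(1, m + 1):
--         curr = [i]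
--         drow = [DEL]  # column 0: along the left edge every move is a delete
--         for j in range(1, n + 1):
--             cost = 0 if S[i - 1] == T[j - 1] else 1
--             v = min(prev[j] + 1, curr[j - 1] + 1, prev[j - 1] + cost)
--             if v == prev[j] + 1:
--                 drow.append(DEL)
--             elif v == curr[j - 1] + 1:
--                 drow.append(INS)
--             else:
--                 drow.append(DIAG)
--             curr.append(v)
--         dirs.append(drow)
--         prev = curr
--     dist = prev[n]
--     i, j = m, n
--     steps = []
--     simulation = [S]
--     while i > 0 or j > 0:
--         d = dirs[i][j]
--         if d == DEL:
--             steps.append(f"削除: {S[i - 1]} (位置 {i - 1})")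
--             S = S[:i - 1] + S[i:]
--             simulation.append(S)
--             i -= 1
--         elif d == INS:
--             steps.append(f"追加: {T[j - 1]} (位置 {j - 1})")
--             S = S[:i] + T[j - 1] + S[i:]
--             simulation.append(S)
--             j -= 1
--         else:
--             if S[i - 1] != T[j - 1]:
--                 steps.append(f"置換: {S[i - 1]} → {T[j - 1]} (位置 {i - 1})")
--                 S = S[:i - 1] + T[j - 1] + S[i:]
--                 simulation.append(S)
--             i -= 1
--             j -= 1
--     steps.reverse()
--     simulation.reverse()
--     return dist, steps, simulation
-- ===== Notes on version B (the rewrite author's own statement) =====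
-- stated objective: alternative
-- what changed: B keeps the O(m*n) DP but stores the dp table as two rolling rows plus a backpointer/direction table filled during the forward pass, so the traceback just follows stored directions instead of re-comparing dp values in the full matrix.
import Mathlib
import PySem

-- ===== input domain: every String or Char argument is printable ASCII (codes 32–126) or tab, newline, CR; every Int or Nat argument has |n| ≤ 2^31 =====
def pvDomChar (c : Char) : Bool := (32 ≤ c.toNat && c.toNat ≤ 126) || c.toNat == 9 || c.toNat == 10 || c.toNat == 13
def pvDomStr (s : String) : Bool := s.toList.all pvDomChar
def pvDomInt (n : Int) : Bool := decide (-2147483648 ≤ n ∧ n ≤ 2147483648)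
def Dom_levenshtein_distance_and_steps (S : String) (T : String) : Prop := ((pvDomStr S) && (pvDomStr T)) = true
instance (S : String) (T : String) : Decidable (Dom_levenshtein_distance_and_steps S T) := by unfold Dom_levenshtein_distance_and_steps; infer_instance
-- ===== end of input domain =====

-- B keeps the same DP but stores a backpointer/direction table during the forward
-- pass (with two rolling dp rows) so the traceback reads stored directions instead
-- of re-comparing dp values; objective: alternative (same asymptotic cost).

-- ===== PORT A =====
-- shared low-level helpers (the identical Python expressions appear in both sources)
def pvGet2 (d : List (List Int)) (i j : Nat) : Int := (d.getD i []).getD j 0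
def pvSet2 (d : List (List Int)) (i j : Nat) (v : Int) : List (List Int) :=
  d.set i ((d.getD i []).set j v)
-- f"削除: {S[i-1]} (位置 {i-1})" etc. (exact: single-char and int formatting)
def pvDelStep (c : Char) (i : Nat) : String :=
  "削除: " ++ String.ofList [c] ++ " (位置 " ++ PySem.Int.toStr ((i : Int) - 1) ++ ")"
def pvInsStep (c : Char) (j : Nat) : String :=
  "追加: " ++ String.ofList [c] ++ " (位置 " ++ PySem.Int.toStr ((j : Int) - 1) ++ ")"
def pvSubStep (c c' : Char) (i : Nat) : String :=
  "置換: " ++ String.ofList [c] ++ " → " ++ String.ofList [c'] ++ " (位置 " ++ PySem.Int.toStr ((i : Int) - 1) ++ ")"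
-- S = S[:i-1] + S[i:]   (i ≥ 1 at every use, so the Nat subtraction is exact)
def pvDelEdit (s : List Char) (i : Nat) : List Char := s.take (i - 1) ++ s.drop i
-- S = S[:i] + T[j-1] + S[i:]
def pvInsEdit (s : List Char) (c : Char) (i : Nat) : List Char := s.take i ++ [c] ++ s.drop i
-- S = S[:i-1] + T[j-1] + S[i:]
def pvSubEdit (s : List Char) (c : Char) (i : Nat) : List Char := s.take (i - 1) ++ [c] ++ s.drop i

-- the three loops filling dp
def pvBuildA (s t : List Char) (m n : Nat) : List (List Int) :=
  let dp0 := List.replicate (m + 1) (List.replicate (n + 1) (0 : Int))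
  let dp1 := (List.range (m + 1)).foldl (fun d i => pvSet2 d i 0 (i : Int)) dp0
  let dp2 := (List.range (n + 1)).foldl (fun d j => pvSet2 d 0 j (j : Int)) dp1
  (List.range' 1 m).foldl (fun d i =>
    (List.range' 1 n).foldl (fun d j =>
      let cost : Int := if s.getD (i - 1) ' ' == t.getD (j - 1) ' ' then 0 else 1
      pvSet2 d i j (min (min (pvGet2 d (i - 1) j + 1) (pvGet2 d i (j - 1) + 1))
        (pvGet2 d (i - 1) (j - 1) + cost))) d) dp2

-- the while loop of A: branch by re-comparing dp values
def pvTraceA (dp : List (List Int)) (t : List Char) (i j : Nat) (s : List Char)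
    (steps : List String) (sim : List String) : List String × List String :=
  if i = 0 ∧ j = 0 then (steps, sim)
  else if h1 : 0 < i ∧ pvGet2 dp i j = pvGet2 dp (i - 1) j + 1 then
    pvTraceA dp t (i - 1) j (pvDelEdit s i)
      (steps ++ [pvDelStep (s.getD (i - 1) ' ') i]) (sim ++ [String.ofList (pvDelEdit s i)])
  else if h2 : 0 < j ∧ pvGet2 dp i j = pvGet2 dp i (j - 1) + 1 then
    pvTraceA dp t i (j - 1) (pvInsEdit s (t.getD (j - 1) ' ') i)
      (steps ++ [pvInsStep (t.getD (j - 1) ' ') j]) (sim ++ [String.ofList (pvInsEdit s (t.getD (j - 1) ' ') i)])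
  else if s.getD (i - 1) ' ' == t.getD (j - 1) ' ' then
    pvTraceA dp t (i - 1) (j - 1) s steps sim
  else
    pvTraceA dp t (i - 1) (j - 1) (pvSubEdit s (t.getD (j - 1) ' ') i)
      (steps ++ [pvSubStep (s.getD (i - 1) ' ') (t.getD (j - 1) ' ') i])
      (sim ++ [String.ofList (pvSubEdit s (t.getD (j - 1) ' ') i)])
termination_by i + j
decreasing_by
  · omega
  · omega
  · omega
  · omega

def levenshtein_distance_and_steps (S : String) (T : String) : Int × List String × List String :=
  let s := S.toList
  let t := T.toList
  let m := s.length
  let n := t.length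
  let dp := pvBuildA s t m n
  let r := pvTraceA dp t m n s [] [String.ofList s]
  (pvGet2 dp m n, r.1.reverse, r.2.reverse)

-- ===== PORT B =====
-- forward pass with two rolling rows and a direction table (0 = DEL, 1 = INS, 2 = DIAG)
def pvForwardB (s t : List Char) (m n : Nat) : List Int × List (List Int) :=
  let prev0 : List Int := (List.range (n + 1)).map (fun k => ((k : Nat) : Int))
  let dirs0 : List (List Int) := [List.replicate (n + 1) (1 : Int)]
  (List.range' 1 m).foldl (fun pd i =>
    let cd := (List.range' 1 n).foldl (fun cd j =>
      let cost : Int := if s.getD (i - 1) ' ' == t.getD (j - 1) ' ' then 0 else 1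
      let v := min (min (pd.1.getD j 0 + 1) (cd.1.getD (j - 1) 0 + 1))
        (pd.1.getD (j - 1) 0 + cost)
      let dir : Int := if v = pd.1.getD j 0 + 1 then 0
        else if v = cd.1.getD (j - 1) 0 + 1 then 1 else 2
      (cd.1 ++ [v], cd.2 ++ [dir])) ([(i : Int)], [(0 : Int)])
    (cd.1, pd.2 ++ [cd.2])) (prev0, dirs0)

-- the while loop of B: branch on the stored direction (fuel only makes the loop
-- total in Lean; m + n is enough because i + j decreases each iteration)
def pvTraceB (dirs : List (List Int)) (t : List Char) (fuel i j : Nat) (s : List Char)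
    (steps : List String) (sim : List String) : List String × List String :=
  if i = 0 ∧ j = 0 then (steps, sim)
  else match fuel with
  | 0 => (steps, sim)
  | fuel + 1 =>
    let d := (dirs.getD i []).getD j 0
    if d = 0 then
      pvTraceB dirs t fuel (i - 1) j (pvDelEdit s i)
        (steps ++ [pvDelStep (s.getD (i - 1) ' ') i]) (sim ++ [String.ofList (pvDelEdit s i)])
    else if d = 1 then
      pvTraceB dirs t fuel i (j - 1) (pvInsEdit s (t.getD (j - 1) ' ') i)
        (steps ++ [pvInsStep (t.getD (j - 1) ' ') j]) (sim ++ [String.ofList (pvInsEdit s (t.getD (j - 1) ' ') i)])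
    else if s.getD (i - 1) ' ' == t.getD (j - 1) ' ' then
      pvTraceB dirs t fuel (i - 1) (j - 1) s steps sim
    else
      pvTraceB dirs t fuel (i - 1) (j - 1) (pvSubEdit s (t.getD (j - 1) ' ') i)
        (steps ++ [pvSubStep (s.getD (i - 1) ' ') (t.getD (j - 1) ' ') i])
        (sim ++ [String.ofList (pvSubEdit s (t.getD (j - 1) ' ') i)])

def levenshtein_distance_and_steps_alt (S : String) (T : String) : Int × List String × List String :=
  let s := S.toList
  let t := T.toList
  let m := s.length
  let n := t.length
  let pd := pvForwardB s t m n
  let dist := pd.1.getD n 0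
  let r := pvTraceB pd.2 t (m + n) m n s [] [String.ofList s]
  (dist, r.1.reverse, r.2.reverse)

-- ===== PRECONDITION & SPEC =====
def Spec_levenshtein_distance_and_steps (S : String) (T : String) (out : Int × List String × List String) : Prop := out = levenshtein_distance_and_steps_alt S T
instance (S : String) (T : String) (out : Int × List String × List String) : Decidable (Spec_levenshtein_distance_and_steps S T out) := by unfold Spec_levenshtein_distance_and_steps; infer_instance

-- ===== CLAIM (what is proved, stated in full; the proofs are below) =====
def Claim_equal_levenshtein_distance_and_steps : Prop := ∀ (S : String) (T : String), Dom_levenshtein_distance_and_steps S T → Spec_levenshtein_distance_and_steps S T (levenshtein_distance_and_steps S T)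

-- ===== LEMMAS AND PROOFS =====

-- the pure Levenshtein recurrence both tables compute
def pvLev (s t : List Char) : Nat → Nat → Int
  | 0, j => (j : Int)
  | i + 1, 0 => ((i : Int) + 1)
  | i + 1, j + 1 =>
    let cost : Int := if s.getD i ' ' == t.getD j ' ' then 0 else 1
    min (min (pvLev s t i (j + 1) + 1) (pvLev s t (i + 1) j + 1)) (pvLev s t i j + cost)

-- the direction A's traceback effectively takes at cell (i, j)
def pvDirChar (s t : List Char) (i j : Nat) : Int :=
  if i = 0 then 1
  else if j = 0 then 0
  else if pvLev s t i j = pvLev s t (i - 1) j + 1 then 0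
  else if pvLev s t i j = pvLev s t i (j - 1) + 1 then 1 else 2

theorem pvLev_zero_right (s t : List Char) (i : Nat) : pvLev s t i 0 = (i : Int) := by
  cases i <;> simp [pvLev]

-- dim invariant
def pvDims (d : List (List Int)) (m n : Nat) : Prop :=
  d.length = m + 1 ∧ ∀ r ∈ d, r.length = n + 1

theorem pvGetD_set_self {α : Type} (l : List α) {i : Nat} (h : i < l.length) (v d : α) :
    (l.set i v).getD i d = v := by
  simp [List.getD_eq_getElem?_getD, List.getElem?_set_self h]

theorem pvGetD_set_ne {α : Type} (l : List α) {i j : Nat} (h : i ≠ j) (v d : α) :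
    (l.set i v).getD j d = l.getD j d := by
  simp [List.getD_eq_getElem?_getD, List.getElem?_set_ne h]

theorem pvDims_set2 {d : List (List Int)} {m n : Nat} (h : pvDims d m n) (i j : Nat) (v : Int) :
    pvDims (pvSet2 d i j v) m n := by
  obtain ⟨h1, h2⟩ := h
  by_cases hi : i < d.length
  · refine ⟨by simp [pvSet2, h1], ?_⟩
    intro r hr
    rcases List.mem_or_eq_of_mem_set hr with h | h
    · exact h2 r h
    · subst h
      have : d.getD i [] = d[i] := by
        simp [List.getD_eq_getElem?_getD, List.getElem?_eq_getElem hi]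
      rw [this]
      simp only [List.length_set]
      exact h2 _ (List.getElem_mem hi)
  · unfold pvSet2
    rw [List.set_eq_of_length_le (by omega)]
    exact ⟨h1, h2⟩

theorem pvGet2_set2_self {d : List (List Int)} {m n : Nat} (h : pvDims d m n) {i j : Nat}
    (hi : i ≤ m) (hj : j ≤ n) (v : Int) : pvGet2 (pvSet2 d i j v) i j = v := by
  obtain ⟨h1, h2⟩ := h
  have hid : i < d.length := by omega
  have hjr : j < (d.getD i []).length := by
    have hrow : (d.getD i []) = d[i] := by
      simp [List.getD_eq_getElem?_getD, List.getElem?_eq_getElem hid]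
    rw [hrow, h2 _ (List.getElem_mem hid)]; omega
  unfold pvGet2 pvSet2
  rw [pvGetD_set_self _ hid, pvGetD_set_self _ hjr]

theorem pvGet2_set2_ne (d : List (List Int)) {i j i' j' : Nat} (hne : i ≠ i' ∨ j ≠ j') (v : Int) :
    pvGet2 (pvSet2 d i j v) i' j' = pvGet2 d i' j' := by
  unfold pvGet2 pvSet2
  by_cases hii : i = i'
  · subst hii
    have hjj : j ≠ j' := by tauto
    by_cases hid : i < d.length
    · rw [pvGetD_set_self _ hid, pvGetD_set_ne _ hjj]
    · rw [List.set_eq_of_length_le (by omega)]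
  · rw [pvGetD_set_ne _ hii]

-- the border pattern after the two initialization loops
def pvBase (m n i j : Nat) : Int :=
  if i = 0 ∧ j ≤ n then (j : Int) else if j = 0 ∧ i ≤ m then (i : Int) else 0

-- the table contents after filling rows < i fully and row i up to column k
def pvStage (s t : List Char) (m n i k i' j' : Nat) : Int :=
  if i' = 0 ∨ j' = 0 then pvBase m n i' j'
  else if i' < i ∨ (i' = i ∧ j' ≤ k) then pvLev s t i' j' else 0

def pvInv (d : List (List Int)) (m n : Nat) (f : Nat → Nat → Int) : Prop :=
  pvDims d m n ∧ ∀ i' ≤ m, ∀ j' ≤ n, pvGet2 d i' j' = f i' j'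

theorem pvBase_eq_lev (s t : List Char) {m n i j : Nat} (hi : i ≤ m) (hj : j ≤ n)
    (h : i = 0 ∨ j = 0) : pvBase m n i j = pvLev s t i j := by
  rcases h with h | h
  · subst h; simp [pvBase, hj, pvLev]
  · subst h; rw [pvLev_zero_right]
    simp only [pvBase]
    split_ifs with h1 h2
    · obtain ⟨h, _⟩ := h1; subst h; rfl
    · rfl
    · exact absurd ⟨trivial, hi⟩ h2

theorem pvStage_eq_lev (s t : List Char) {m n i k i' j' : Nat} (hi : i' ≤ m) (hj : j' ≤ n)
    (h : i' < i ∨ (i' = i ∧ j' ≤ k)) : pvStage s t m n i k i' j' = pvLev s t i' j' := by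
  unfold pvStage
  by_cases hb : i' = 0 ∨ j' = 0
  · rw [if_pos hb]; exact pvBase_eq_lev s t hi hj hb
  · rw [if_neg hb, if_pos h]

-- one inner-loop step preserves the invariant, advancing the stage by one column
theorem pvStepA (s t : List Char) {m n i k : Nat} (hi1 : 1 ≤ i) (him : i ≤ m) (hk : k < n)
    {d : List (List Int)} (H : pvInv d m n (pvStage s t m n i k)) :
    pvInv
      (pvSet2 d i (k + 1) (min (min (pvGet2 d (i - 1) (k + 1) + 1) (pvGet2 d i (k + 1 - 1) + 1))
        (pvGet2 d (i - 1) (k + 1 - 1) +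
          (if s.getD (i - 1) ' ' == t.getD (k + 1 - 1) ' ' then 0 else 1))))
      m n (pvStage s t m n i (k + 1)) := by
  obtain ⟨Hd, Hv⟩ := H
  refine ⟨pvDims_set2 Hd _ _ _, ?_⟩
  intro i' hi' j' hj'
  by_cases hc : i' = i ∧ j' = k + 1
  · obtain ⟨e1, e2⟩ := hc
    rw [e1, e2]
    rw [pvGet2_set2_self Hd him (show k + 1 ≤ n by omega)]
    have r1 : pvGet2 d (i - 1) (k + 1) = pvLev s t (i - 1) (k + 1) := by
      rw [Hv (i - 1) (by omega) (k + 1) (by omega)]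
      exact pvStage_eq_lev s t (by omega) (by omega) (Or.inl (by omega))
    have r2 : pvGet2 d i k = pvLev s t i k := by
      rw [Hv i him k (by omega)]
      exact pvStage_eq_lev s t him (by omega) (Or.inr ⟨rfl, le_refl k⟩)
    have r3 : pvGet2 d (i - 1) k = pvLev s t (i - 1) k := by
      rw [Hv (i - 1) (by omega) k (by omega)]
      exact pvStage_eq_lev s t (by omega) (by omega) (Or.inl (by omega))
    rw [show k + 1 - 1 = k by omega, r1, r2, r3]
    rw [pvStage_eq_lev s t him (show k + 1 ≤ n by omega) (Or.inr ⟨rfl, le_refl _⟩)]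
    obtain ⟨i0, rfl⟩ : ∃ i0, i = i0 + 1 := ⟨i - 1, by omega⟩
    show _ = pvLev s t (i0 + 1) (k + 1)
    rw [pvLev]
    simp only [Nat.add_sub_cancel]
  · rw [pvGet2_set2_ne d (by tauto) _, Hv _ hi' _ hj']
    unfold pvStage
    by_cases hb : i' = 0 ∨ j' = 0
    · rw [if_pos hb, if_pos hb]
    · rw [if_neg hb, if_neg hb]
      have : (i' < i ∨ i' = i ∧ j' ≤ k) ↔ (i' < i ∨ i' = i ∧ j' ≤ k + 1) := by
        constructor <;> intro h
        · rcases h with h | ⟨h1, h2⟩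
          · exact Or.inl h
          · exact Or.inr ⟨h1, by omega⟩
        · rcases h with h | ⟨h1, h2⟩
          · exact Or.inl h
          · rcases Nat.lt_or_ge j' (k + 1) with hlt | hge
            · exact Or.inr ⟨h1, by omega⟩
            · exact absurd ⟨h1, by omega⟩ hc
      by_cases hcc : i' < i ∨ i' = i ∧ j' ≤ k
      · rw [if_pos hcc, if_pos (this.mp hcc)]
      · rw [if_neg hcc, if_neg (fun h => hcc (this.mpr h))]

-- the inner loop up to column k
theorem pvInnerA (s t : List Char) {m n i : Nat} (hi1 : 1 ≤ i) (him : i ≤ m) :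
    ∀ k ≤ n, ∀ d : List (List Int), pvInv d m n (pvStage s t m n i 0) →
      pvInv ((List.range' 1 k).foldl (fun d j =>
          let cost : Int := if s.getD (i - 1) ' ' == t.getD (j - 1) ' ' then 0 else 1
          pvSet2 d i j (min (min (pvGet2 d (i - 1) j + 1) (pvGet2 d i (j - 1) + 1))
            (pvGet2 d (i - 1) (j - 1) + cost))) d)
        m n (pvStage s t m n i k) := by
  intro k
  induction k with
  | zero => intro _ d H; simpa using H
  | succ k ih =>
    intro hk d H
    have hrange : List.range' 1 (k + 1) = List.range' 1 k ++ [1 + 1 * k] := List.range'_concat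
    rw [hrange, List.foldl_append]
    have hk' : k ≤ n := by omega
    have H1 := ih hk' d H
    have := pvStepA s t hi1 him (show k < n by omega) H1
    simp only [List.foldl_cons, List.foldl_nil]
    rw [show 1 + 1 * k = k + 1 by omega]
    exact this

-- moving to the next row relabels the stage
theorem pvStage_row_step (s t : List Char) (m n i : Nat) :
    ∀ i', ∀ j' ≤ n, pvStage s t m n i n i' j' = pvStage s t m n (i + 1) 0 i' j' := by
  intro i' j' hj'
  unfold pvStage
  split_ifs <;> first | rfl | omega

theorem pvInv_congr {d : List (List Int)} {m n : Nat} {f g : Nat → Nat → Int}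
    (H : pvInv d m n f) (h : ∀ i' ≤ m, ∀ j' ≤ n, f i' j' = g i' j') : pvInv d m n g :=
  ⟨H.1, fun i' hi' j' hj' => (H.2 i' hi' j' hj').trans (h i' hi' j' hj')⟩

theorem pvDims_dp0 (m n : Nat) :
    pvDims (List.replicate (m + 1) (List.replicate (n + 1) (0 : Int))) m n := by
  constructor
  · simp
  · intro r hr
    rw [List.eq_of_mem_replicate hr]
    simp

theorem pvGet2_dp0 (m n i j : Nat) :
    pvGet2 (List.replicate (m + 1) (List.replicate (n + 1) (0 : Int))) i j = 0 := by
  simp only [pvGet2, List.getD_eq_getElem?_getD, List.getElem?_replicate]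
  split_ifs <;> simp

theorem pvInit1 (m n : Nat) : ∀ K ≤ m + 1,
    pvDims ((List.range K).foldl (fun d i => pvSet2 d i 0 (i : Int))
      (List.replicate (m + 1) (List.replicate (n + 1) (0 : Int)))) m n ∧
    ∀ i' ≤ m, ∀ j' ≤ n, pvGet2 ((List.range K).foldl (fun d i => pvSet2 d i 0 (i : Int))
      (List.replicate (m + 1) (List.replicate (n + 1) (0 : Int)))) i' j' =
      if i' < K ∧ j' = 0 then (i' : Int) else 0 := by
  intro K
  induction K with
  | zero =>
    intro _
    refine ⟨pvDims_dp0 m n, ?_⟩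
    intro i' _ j' _
    simp [pvGet2_dp0]
  | succ K ih =>
    intro hK
    obtain ⟨IHd, IHv⟩ := ih (by omega)
    rw [List.range_succ, List.foldl_append, List.foldl_cons, List.foldl_nil]
    refine ⟨pvDims_set2 IHd _ _ _, ?_⟩
    intro i' hi' j' hj'
    by_cases hc : i' = K ∧ j' = 0
    · obtain ⟨e1, e2⟩ := hc
      rw [e1, e2, pvGet2_set2_self IHd (by omega) (by omega)]
      rw [if_pos ⟨by omega, rfl⟩]
    · rw [pvGet2_set2_ne _ (by tauto) _, IHv i' hi' j' hj']
      split_ifs <;> omega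

theorem pvInit2 (m n : Nat) : ∀ K ≤ n + 1,
    pvDims ((List.range K).foldl (fun d j => pvSet2 d 0 j (j : Int))
      ((List.range (m + 1)).foldl (fun d i => pvSet2 d i 0 (i : Int))
        (List.replicate (m + 1) (List.replicate (n + 1) (0 : Int))))) m n ∧
    ∀ i' ≤ m, ∀ j' ≤ n, pvGet2 ((List.range K).foldl (fun d j => pvSet2 d 0 j (j : Int))
      ((List.range (m + 1)).foldl (fun d i => pvSet2 d i 0 (i : Int))
        (List.replicate (m + 1) (List.replicate (n + 1) (0 : Int))))) i' j' =
      if i' = 0 ∧ j' < K then (j' : Int) else if i' < m + 1 ∧ j' = 0 then (i' : Int) else 0 := by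
  intro K
  induction K with
  | zero =>
    intro _
    obtain ⟨Hd, Hv⟩ := pvInit1 m n (m + 1) (le_refl _)
    refine ⟨Hd, ?_⟩
    intro i' hi' j' hj'
    rw [List.range_zero, List.foldl_nil, Hv i' hi' j' hj']
    split_ifs <;> omega
  | succ K ih =>
    intro hK
    obtain ⟨IHd, IHv⟩ := ih (by omega)
    have e : ∀ X : List (List Int), (List.range (K + 1)).foldl (fun d j => pvSet2 d 0 j (j : Int)) X =
        pvSet2 ((List.range K).foldl (fun d j => pvSet2 d 0 j (j : Int)) X) 0 K (K : Int) := by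
      intro X
      rw [List.range_succ, List.foldl_append, List.foldl_cons, List.foldl_nil]
    rw [e]
    refine ⟨pvDims_set2 IHd _ _ _, ?_⟩
    intro i' hi' j' hj'
    by_cases hc : i' = 0 ∧ j' = K
    · obtain ⟨e1, e2⟩ := hc
      rw [e1, e2, pvGet2_set2_self IHd (by omega) (by omega)]
      rw [if_pos ⟨rfl, by omega⟩]
    · rw [pvGet2_set2_ne _ (by tauto) _, IHv i' hi' j' hj']
      split_ifs <;> omega

-- table characterization for A
theorem pvBuildA_spec (s t : List Char) (m n : Nat) :
    ∀ i ≤ m, ∀ j ≤ n, pvGet2 (pvBuildA s t m n) i j = pvLev s t i j := by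
  have base : pvInv ((List.range (n + 1)).foldl (fun d j => pvSet2 d 0 j (j : Int))
      ((List.range (m + 1)).foldl (fun d i => pvSet2 d i 0 (i : Int))
        (List.replicate (m + 1) (List.replicate (n + 1) (0 : Int))))) m n
      (pvStage s t m n 1 0) := by
    obtain ⟨Hd, Hv⟩ := pvInit2 m n (n + 1) (le_refl _)
    refine ⟨Hd, ?_⟩
    intro i' hi' j' hj'
    rw [Hv i' hi' j' hj']
    unfold pvStage pvBase
    split_ifs <;> first | rfl | omega
  have outer : ∀ r ≤ m,
      pvInv ((List.range' 1 r).foldl (fun d i =>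
        (List.range' 1 n).foldl (fun d j =>
          let cost : Int := if s.getD (i - 1) ' ' == t.getD (j - 1) ' ' then 0 else 1
          pvSet2 d i j (min (min (pvGet2 d (i - 1) j + 1) (pvGet2 d i (j - 1) + 1))
            (pvGet2 d (i - 1) (j - 1) + cost))) d)
        ((List.range (n + 1)).foldl (fun d j => pvSet2 d 0 j (j : Int))
          ((List.range (m + 1)).foldl (fun d i => pvSet2 d i 0 (i : Int))
            (List.replicate (m + 1) (List.replicate (n + 1) (0 : Int)))))) m n
        (pvStage s t m n (r + 1) 0) := by
    intro r
    induction r with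
    | zero => intro _; simpa using base
    | succ r ih =>
      intro hr
      have IH := ih (by omega)
      rw [List.range'_concat, List.foldl_append, List.foldl_cons, List.foldl_nil]
      rw [show 1 + 1 * r = r + 1 by omega]
      have step := pvInnerA s t (show 1 ≤ r + 1 by omega) (show r + 1 ≤ m by omega)
        n (le_refl n) _ IH
      exact pvInv_congr step (fun a _ => pvStage_row_step s t m n (r + 1) a)
  intro i hi j hj
  obtain ⟨_, Hv⟩ := outer m (le_refl m)
  show pvGet2 (pvBuildA s t m n) i j = pvLev s t i j
  unfold pvBuildA
  rw [Hv i hi j hj]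
  exact pvStage_eq_lev s t hi hj (Or.inl (by omega))

theorem pvDirChar_pos (s t : List Char) {i j : Nat} (hi : i ≠ 0) (hj : j ≠ 0) :
    pvDirChar s t i j = if pvLev s t i j = pvLev s t (i - 1) j + 1 then 0
      else if pvLev s t i j = pvLev s t i (j - 1) + 1 then 1 else 2 := by
  unfold pvDirChar
  rw [if_neg hi, if_neg hj]

theorem pvGetD_append_left {α : Type} (l l' : List α) {i : Nat} (h : i < l.length) (d : α) :
    (l ++ l').getD i d = l.getD i d := by
  simp [List.getD_eq_getElem?_getD, List.getElem?_append_left h]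

theorem pvGetD_concat_length {α : Type} (l : List α) (v d : α) :
    (l ++ [v]).getD l.length d = v := by
  simp [List.getD_eq_getElem?_getD]

-- inner loop of B: builds row i of dp values together with its direction row
theorem pvInnerB_spec (s t : List Char) (prev : List Int) (i n : Nat) (hi : 1 ≤ i)
    (Hp : ∀ j ≤ n, prev.getD j 0 = pvLev s t (i - 1) j) :
    ∀ k ≤ n,
      ((List.range' 1 k).foldl (fun cd j =>
        let cost : Int := if s.getD (i - 1) ' ' == t.getD (j - 1) ' ' then 0 else 1
        let v := min (min (prev.getD j 0 + 1) (cd.1.getD (j - 1) 0 + 1))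
          (prev.getD (j - 1) 0 + cost)
        let dir : Int := if v = prev.getD j 0 + 1 then 0
          else if v = cd.1.getD (j - 1) 0 + 1 then 1 else 2
        (cd.1 ++ [v], cd.2 ++ [dir])) (([(i : Int)], [(0 : Int)]) : List Int × List Int)).1.length = k + 1 ∧
      ((List.range' 1 k).foldl (fun cd j =>
        let cost : Int := if s.getD (i - 1) ' ' == t.getD (j - 1) ' ' then 0 else 1
        let v := min (min (prev.getD j 0 + 1) (cd.1.getD (j - 1) 0 + 1))
          (prev.getD (j - 1) 0 + cost)
        let dir : Int := if v = prev.getD j 0 + 1 then 0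
          else if v = cd.1.getD (j - 1) 0 + 1 then 1 else 2
        (cd.1 ++ [v], cd.2 ++ [dir])) (([(i : Int)], [(0 : Int)]) : List Int × List Int)).2.length = k + 1 ∧
      (∀ j ≤ k, ((List.range' 1 k).foldl (fun cd j =>
        let cost : Int := if s.getD (i - 1) ' ' == t.getD (j - 1) ' ' then 0 else 1
        let v := min (min (prev.getD j 0 + 1) (cd.1.getD (j - 1) 0 + 1))
          (prev.getD (j - 1) 0 + cost)
        let dir : Int := if v = prev.getD j 0 + 1 then 0
          else if v = cd.1.getD (j - 1) 0 + 1 then 1 else 2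
        (cd.1 ++ [v], cd.2 ++ [dir])) (([(i : Int)], [(0 : Int)]) : List Int × List Int)).1.getD j 0 = pvLev s t i j) ∧
      (∀ j ≤ k, ((List.range' 1 k).foldl (fun cd j =>
        let cost : Int := if s.getD (i - 1) ' ' == t.getD (j - 1) ' ' then 0 else 1
        let v := min (min (prev.getD j 0 + 1) (cd.1.getD (j - 1) 0 + 1))
          (prev.getD (j - 1) 0 + cost)
        let dir : Int := if v = prev.getD j 0 + 1 then 0
          else if v = cd.1.getD (j - 1) 0 + 1 then 1 else 2
        (cd.1 ++ [v], cd.2 ++ [dir])) (([(i : Int)], [(0 : Int)]) : List Int × List Int)).2.getD j 0 = pvDirChar s t i j) := by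
  intro k
  induction k with
  | zero =>
    intro _
    refine ⟨rfl, rfl, ?_, ?_⟩
    · intro j hj
      interval_cases j
      simp only [List.range'_zero, List.foldl_nil]
      rw [show ([(i : Int)] : List Int).getD 0 0 = (i : Int) from rfl, pvLev_zero_right]
    · intro j hj
      interval_cases j
      simp only [List.range'_zero, List.foldl_nil]
      rw [show ([(0 : Int)] : List Int).getD 0 0 = (0 : Int) from rfl]
      unfold pvDirChar
      rw [if_neg (by omega), if_pos rfl]
  | succ k ih =>
    intro hk
    obtain ⟨L1, L2, V1, V2⟩ := ih (by omega)
    rw [List.range'_concat, show 1 + 1 * k = k + 1 by omega, List.foldl_append,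
      List.foldl_cons, List.foldl_nil]
    set cd := (List.range' 1 k).foldl _ (([(i : Int)], [(0 : Int)]) : List Int × List Int) with hcd
    obtain ⟨i0, rfl⟩ : ∃ i0, i = i0 + 1 := ⟨i - 1, by omega⟩
    have hv : min (min (prev.getD (k + 1) 0 + 1) (cd.1.getD (k + 1 - 1) 0 + 1))
        (prev.getD (k + 1 - 1) 0 +
          (if s.getD (i0 + 1 - 1) ' ' == t.getD (k + 1 - 1) ' ' then 0 else 1)) =
        pvLev s t (i0 + 1) (k + 1) := by
      rw [show k + 1 - 1 = k by omega, show i0 + 1 - 1 = i0 by omega]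
      rw [Hp (k + 1) (by omega), Hp k (by omega), V1 k (le_refl k)]
      rw [show i0 + 1 - 1 = i0 by omega]
      conv_rhs => rw [pvLev]
    refine ⟨?_, ?_, ?_, ?_⟩
    · simp [L1]
    · simp [L2]
    · intro j hj
      rcases Nat.lt_or_ge j (k + 1) with hlt | hge
      · rw [pvGetD_append_left _ _ (by omega), V1 j (by omega)]
      · have hj' : j = k + 1 := by omega
        subst hj'
        rw [show k + 1 = cd.1.length from L1.symm, pvGetD_concat_length, L1, hv]
    · intro j hj
      rcases Nat.lt_or_ge j (k + 1) with hlt | hge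
      · rw [pvGetD_append_left _ _ (by omega), V2 j (by omega)]
      · have hj' : j = k + 1 := by omega
        subst hj'
        rw [show k + 1 = cd.2.length from L2.symm, pvGetD_concat_length, L2, hv]
        rw [Hp (k + 1) (by omega), show k + 1 - 1 = k by omega, V1 k (le_refl k)]
        rw [pvDirChar_pos s t (by omega) (by omega), show k + 1 - 1 = k by omega]

-- forward pass characterization for B (pvOuterB r is pvForwardB's fold stopped after r rows)
def pvOuterB (s t : List Char) (n : Nat) (r : Nat) : List Int × List (List Int) :=
  (List.range' 1 r).foldl (fun pd i =>
    let cd := (List.range' 1 n).foldl (fun cd j =>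
      let cost : Int := if s.getD (i - 1) ' ' == t.getD (j - 1) ' ' then 0 else 1
      let v := min (min (pd.1.getD j 0 + 1) (cd.1.getD (j - 1) 0 + 1))
        (pd.1.getD (j - 1) 0 + cost)
      let dir : Int := if v = pd.1.getD j 0 + 1 then 0
        else if v = cd.1.getD (j - 1) 0 + 1 then 1 else 2
      (cd.1 ++ [v], cd.2 ++ [dir])) ([(i : Int)], [(0 : Int)])
    (cd.1, pd.2 ++ [cd.2]))
    ((List.range (n + 1)).map (fun k => ((k : Nat) : Int)), [List.replicate (n + 1) (1 : Int)])

theorem pvOuterB_spec (s t : List Char) (m n : Nat) : ∀ r ≤ m,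
    (pvOuterB s t n r).1.length = n + 1 ∧
    (∀ j ≤ n, (pvOuterB s t n r).1.getD j 0 = pvLev s t r j) ∧
    (pvOuterB s t n r).2.length = r + 1 ∧
    (∀ i' ≤ r, ∀ j ≤ n, (((pvOuterB s t n r).2.getD i' []).getD j 0 = pvDirChar s t i' j)) := by
  intro r
  induction r with
  | zero =>
    intro _
    refine ⟨by simp [pvOuterB], ?_, by simp [pvOuterB], ?_⟩
    · intro j hj
      simp only [pvOuterB, List.range'_zero, List.foldl_nil]
      rw [PySem.List.getD_map_range _ _ _ _ (by omega : j < n + 1)]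
      simp [pvLev]
    · intro i' hi' j hj
      interval_cases i'
      simp only [pvOuterB, List.range'_zero, List.foldl_nil]
      rw [show (([List.replicate (n + 1) (1 : Int)] : List (List Int)).getD 0 []) =
        List.replicate (n + 1) (1 : Int) from rfl]
      rw [List.getD_eq_getElem?_getD, List.getElem?_replicate, if_pos (by omega)]
      unfold pvDirChar
      rw [if_pos rfl]
      rfl
  | succ r ih =>
    intro hr
    obtain ⟨L1, V1, L2, V2⟩ := ih (by omega)
    have hstep : pvOuterB s t n (r + 1) =
        (let cd := (List.range' 1 n).foldl (fun cd j =>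
          let cost : Int := if s.getD (r + 1 - 1) ' ' == t.getD (j - 1) ' ' then 0 else 1
          let v := min (min ((pvOuterB s t n r).1.getD j 0 + 1) (cd.1.getD (j - 1) 0 + 1))
            ((pvOuterB s t n r).1.getD (j - 1) 0 + cost)
          let dir : Int := if v = (pvOuterB s t n r).1.getD j 0 + 1 then 0
            else if v = cd.1.getD (j - 1) 0 + 1 then 1 else 2
          (cd.1 ++ [v], cd.2 ++ [dir])) ([((r + 1 : Nat) : Int)], [(0 : Int)])
        (cd.1, (pvOuterB s t n r).2 ++ [cd.2])) := by
      unfold pvOuterB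
      rw [List.range'_concat, show 1 + 1 * r = r + 1 by omega, List.foldl_append,
        List.foldl_cons, List.foldl_nil]
    rw [hstep]
    obtain ⟨CL1, CL2, CV1, CV2⟩ := pvInnerB_spec s t (pvOuterB s t n r).1 (r + 1) n (by omega)
      (by intro j hj; rw [V1 j hj]; norm_num) n (le_refl n)
    refine ⟨by simpa using CL1, ?_, by simp [L2], ?_⟩
    · intro j hj
      exact CV1 j hj
    · intro i' hi' j hj
      rcases Nat.lt_or_ge i' (r + 1) with hlt | hge
      · show ((((pvOuterB s t n r).2 ++ [_]).getD i' []).getD j 0) = _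
        rw [pvGetD_append_left _ _ (show i' < (pvOuterB s t n r).2.length by omega)]
        exact V2 i' (by omega) j hj
      · have : i' = r + 1 := by omega
        subst this
        show ((((pvOuterB s t n r).2 ++ [_]).getD (r + 1) []).getD j 0) = _
        rw [show r + 1 = (pvOuterB s t n r).2.length from L2.symm, pvGetD_concat_length, L2]
        exact CV2 j hj

theorem pvForwardB_eq_outer (s t : List Char) (m n : Nat) :
    pvForwardB s t m n = pvOuterB s t n m := rfl

theorem pvForwardB_spec (s t : List Char) (m n : Nat) :
    ((pvForwardB s t m n).1.length = n + 1 ∧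
      ∀ j ≤ n, (pvForwardB s t m n).1.getD j 0 = pvLev s t m j) ∧
    (∀ i ≤ m, ∀ j ≤ n, ((pvForwardB s t m n).2.getD i []).getD j 0 = pvDirChar s t i j) := by
  obtain ⟨L1, V1, L2, V2⟩ := pvOuterB_spec s t m n m (le_refl m)
  rw [pvForwardB_eq_outer]
  exact ⟨⟨L1, V1⟩, V2⟩

-- traceback equivalence
theorem pvTrace_eq (dp : List (List Int)) (dirs : List (List Int)) (s0 t : List Char) (m n : Nat)
    (HA : ∀ i ≤ m, ∀ j ≤ n, pvGet2 dp i j = pvLev s0 t i j)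
    (HD : ∀ i ≤ m, ∀ j ≤ n, (dirs.getD i []).getD j 0 = pvDirChar s0 t i j) :
    ∀ fuel i j, i ≤ m → j ≤ n → i + j ≤ fuel → ∀ s steps sim,
      pvTraceA dp t i j s steps sim = pvTraceB dirs t fuel i j s steps sim := by
  intro fuel
  induction fuel with
  | zero =>
    intro i j hi hj hf s steps sim
    have h0 : i = 0 ∧ j = 0 := by omega
    rw [pvTraceA, pvTraceB, if_pos h0, if_pos h0]
  | succ fuel ih =>
    intro i j hi hj hf s steps sim
    by_cases h0 : i = 0 ∧ j = 0
    · rw [pvTraceA, pvTraceB, if_pos h0, if_pos h0]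
    · have hd : (dirs.getD i []).getD j 0 = pvDirChar s0 t i j := HD i hi j hj
      rw [pvTraceA, pvTraceB, if_neg h0, if_neg h0]
      rcases Nat.eq_zero_or_pos i with hiz | hip
      · -- i = 0, j > 0 : both insert
        have hjp : 0 < j := by omega
        subst hiz
        have hc1 : ¬ (0 < 0 ∧ pvGet2 dp 0 j = pvGet2 dp (0 - 1) j + 1) := by omega
        have hc2 : 0 < j ∧ pvGet2 dp 0 j = pvGet2 dp 0 (j - 1) + 1 := by
          refine ⟨hjp, ?_⟩
          rw [HA 0 (by omega) j hj, HA 0 (by omega) (j - 1) (by omega)]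
          rw [pvLev, pvLev]
          omega
        have hdir : pvDirChar s0 t 0 j = 1 := by unfold pvDirChar; rw [if_pos rfl]
        rw [dif_neg hc1, dif_pos hc2, hd, hdir]
        rw [if_neg (show ¬ ((1 : Int) = 0) by norm_num), if_pos rfl]
        exact ih 0 (j - 1) (by omega) (by omega) (by omega) _ _ _
      · rcases Nat.eq_zero_or_pos j with hjz | hjp
        · -- j = 0, i > 0 : both delete
          subst hjz
          have hc1 : 0 < i ∧ pvGet2 dp i 0 = pvGet2 dp (i - 1) 0 + 1 := by
            refine ⟨hip, ?_⟩
            rw [HA i hi 0 (by omega), HA (i - 1) (by omega) 0 (by omega)]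
            rw [pvLev_zero_right, pvLev_zero_right]
            omega
          have hdir : pvDirChar s0 t i 0 = 0 := by
            unfold pvDirChar
            rw [if_neg (by omega), if_pos rfl]
          rw [dif_pos hc1, hd, hdir, if_pos rfl]
          exact ih (i - 1) 0 (by omega) (by omega) (by omega) _ _ _
        · -- interior
          have e1 : pvGet2 dp i j = pvLev s0 t i j := HA i hi j hj
          have e2 : pvGet2 dp (i - 1) j = pvLev s0 t (i - 1) j := HA (i - 1) (by omega) j hj
          have e3 : pvGet2 dp i (j - 1) = pvLev s0 t i (j - 1) := HA i hi (j - 1) (by omega)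
          have hdir : pvDirChar s0 t i j =
              if pvLev s0 t i j = pvLev s0 t (i - 1) j + 1 then 0
              else if pvLev s0 t i j = pvLev s0 t i (j - 1) + 1 then 1 else 2 :=
            pvDirChar_pos s0 t (by omega) (by omega)
          by_cases c1 : pvLev s0 t i j = pvLev s0 t (i - 1) j + 1
          · rw [dif_pos ⟨hip, by rw [e1, e2]; exact c1⟩, hd, hdir, if_pos c1, if_pos rfl]
            exact ih (i - 1) j (by omega) hj (by omega) _ _ _
          · rw [dif_neg (show ¬ (0 < i ∧ pvGet2 dp i j = pvGet2 dp (i - 1) j + 1) from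
                fun h => c1 (by rw [← e1, ← e2]; exact h.2))]
            by_cases c2 : pvLev s0 t i j = pvLev s0 t i (j - 1) + 1
            · rw [dif_pos ⟨hjp, by rw [e1, e3]; exact c2⟩, hd, hdir, if_neg c1, if_pos c2]
              rw [if_neg (show ¬ ((1 : Int) = 0) by norm_num), if_pos rfl]
              exact ih i (j - 1) hi (by omega) (by omega) _ _ _
            · rw [dif_neg (show ¬ (0 < j ∧ pvGet2 dp i j = pvGet2 dp i (j - 1) + 1) from
                fun h => c2 (by rw [← e1, ← e3]; exact h.2)), hd, hdir, if_neg c1, if_neg c2]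
              rw [if_neg (show ¬ ((2 : Int) = 0) by norm_num),
                if_neg (show ¬ ((2 : Int) = 1) by norm_num)]
              by_cases hch : (s.getD (i - 1) ' ' == t.getD (j - 1) ' ') = true
              · rw [if_pos hch, if_pos hch]
                exact ih (i - 1) (j - 1) (by omega) (by omega) (by omega) _ _ _
              · rw [if_neg hch, if_neg hch]
                exact ih (i - 1) (j - 1) (by omega) (by omega) (by omega) _ _ _

-- ===== VERDICT (by name: the statement is the Claim_ definition above) =====
theorem levenshtein_distance_and_steps_spec : Claim_equal_levenshtein_distance_and_steps := by
  intro S T _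
  unfold Spec_levenshtein_distance_and_steps
  have HA := pvBuildA_spec S.toList T.toList S.toList.length T.toList.length
  have HF := pvForwardB_spec S.toList T.toList S.toList.length T.toList.length
  have HT := pvTrace_eq (pvBuildA S.toList T.toList S.toList.length T.toList.length)
    (pvForwardB S.toList T.toList S.toList.length T.toList.length).2
    S.toList T.toList S.toList.length T.toList.length HA HF.2
    (S.toList.length + T.toList.length) S.toList.length T.toList.length
    (le_refl _) (le_refl _) (le_refl _) S.toList [] [String.ofList S.toList]
  have hdist : pvGet2 (pvBuildA S.toList T.toList S.toList.length T.toList.length)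
      S.toList.length T.toList.length =
      (pvForwardB S.toList T.toList S.toList.length T.toList.length).1.getD T.toList.length 0 := by
    rw [HA S.toList.length (le_refl _) T.toList.length (le_refl _),
      HF.1.2 T.toList.length (le_refl _)]
  show (pvGet2 (pvBuildA S.toList T.toList S.toList.length T.toList.length)
      S.toList.length T.toList.length,
    (pvTraceA (pvBuildA S.toList T.toList S.toList.length T.toList.length) T.toList
      S.toList.length T.toList.length S.toList [] [String.ofList S.toList]).1.reverse,
    (pvTraceA (pvBuildA S.toList T.toList S.toList.length T.toList.length) T.toList
      S.toList.length T.toList.length S.toList [] [String.ofList S.toList]).2.reverse) =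
    ((pvForwardB S.toList T.toList S.toList.length T.toList.length).1.getD T.toList.length 0,
    (pvTraceB (pvForwardB S.toList T.toList S.toList.length T.toList.length).2 T.toList
      (S.toList.length + T.toList.length) S.toList.length T.toList.length S.toList []
      [String.ofList S.toList]).1.reverse,
    (pvTraceB (pvForwardB S.toList T.toList S.toList.length T.toList.length).2 T.toList
      (S.toList.length + T.toList.length) S.toList.length T.toList.length S.toList []
      [String.ofList S.toList]).2.reverse)
  rw [hdist, HT]
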